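-- pv_equiv track=rewrite | github.com/Jodza45/VestackaInteligencija | lab1/3.py | uredi3
-- ===== SOURCE A (Python) =====
-- def uredi3(lista_brojeva, N, num):
--     nova_lista = []
--
--     for i, x in enumerate(lista_brojeva):
--         if i < N:
--             nova_lista.append(x + num)
--         else:
--             nova_lista.append(x - num)
--
--     return nova_lista
-- ===== SOURCE B (Python) =====
-- def uredi3(lista_brojeva, N, num):
--     # Add num uniformly, then correct the tail by subtracting 2*num in place:
--     # (x + num) - 2*num == x - num for the elements at index >= N.
--     out = [x + num for x in lista_brojeva]
--     for i in range(max(0, N), len(out)):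
--         out[i] -= 2 * num
--     return out
-- ===== Notes on version B (the rewrite author's own statement) =====
-- stated objective: alternative
-- what changed: Instead of branching per index, B first adds num to every element uniformly and then repairs the tail with an in-place second pass that subtracts 2*num from each element at index >= max(0,N), using (x+num)-2*num = x-num.
import Mathlib
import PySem

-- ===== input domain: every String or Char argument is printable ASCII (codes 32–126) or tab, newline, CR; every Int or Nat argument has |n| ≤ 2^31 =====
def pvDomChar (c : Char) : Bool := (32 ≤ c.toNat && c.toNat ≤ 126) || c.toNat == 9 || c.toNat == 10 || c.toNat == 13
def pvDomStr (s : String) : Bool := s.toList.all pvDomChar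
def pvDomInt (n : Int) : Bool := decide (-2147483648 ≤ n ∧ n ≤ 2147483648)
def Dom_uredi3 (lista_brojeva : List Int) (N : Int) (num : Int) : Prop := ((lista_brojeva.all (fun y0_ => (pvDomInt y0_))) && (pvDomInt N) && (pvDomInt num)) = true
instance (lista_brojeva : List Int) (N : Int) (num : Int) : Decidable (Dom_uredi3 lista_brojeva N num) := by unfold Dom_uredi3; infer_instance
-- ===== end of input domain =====

-- B adds num uniformly to every element, then a second in-place pass subtracts
-- 2*num from each element at index >= max(0,N) ((x+num)-2*num = x-num); same output.

-- ===== PORT A =====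
-- for i, x in enumerate(lista_brojeva): append(x+num) if i < N else append(x-num)
def uredi3 (lista_brojeva : List Int) (N : Int) (num : Int) : List Int :=
  (PySem.List.enumerate lista_brojeva).foldl
    (fun nova_lista p =>
      if p.1 < N then nova_lista ++ [p.2 + num] else nova_lista ++ [p.2 - num])
    []

-- ===== PORT B =====
-- out = [x + num for x in lista_brojeva]; for i in range(max(0,N), len(out)): out[i] -= 2*num
-- (out[i] -= 2*num is ported as List.set at i with the current value read by getD;
--  every i produced by the range is a valid nonnegative index, so this is exact)
def uredi3_alt (lista_brojeva : List Int) (N : Int) (num : Int) : List Int :=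
  let out := lista_brojeva.map (· + num)
  (PySem.List.pyRange (max 0 N) out.length 1).foldl
    (fun o i => o.set i.toNat (o.getD i.toNat 0 - 2 * num)) out

-- ===== PRECONDITION & SPEC =====
def Spec_uredi3 (lista_brojeva : List Int) (N : Int) (num : Int) (out : List Int) : Prop := out = uredi3_alt lista_brojeva N num
instance (lista_brojeva : List Int) (N : Int) (num : Int) (out : List Int) : Decidable (Spec_uredi3 lista_brojeva N num out) := by unfold Spec_uredi3; infer_instance

-- ===== CLAIM (what is proved, stated in full; the proofs are below) =====
def Claim_equal_uredi3 : Prop := ∀ (lista_brojeva : List Int) (N : Int) (num : Int), Dom_uredi3 lista_brojeva N num → Spec_uredi3 lista_brojeva N num (uredi3 lista_brojeva N num)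

-- ===== LEMMAS AND PROOFS =====

-- A's loop appends x+num for the first N positions and x-num afterwards.
theorem uredi3_loop (l : List Int) (N num s : Int) (acc : List Int) :
    (PySem.List.enumerate l s).foldl
      (fun nova_lista p =>
        if p.1 < N then nova_lista ++ [p.2 + num] else nova_lista ++ [p.2 - num])
      acc
    = acc ++ (l.take (max 0 (N - s)).toNat).map (· + num)
          ++ (l.drop (max 0 (N - s)).toNat).map (· - num) := by
  induction l generalizing s acc with
  | nil => simp [PySem.List.enumerate_nil]
  | cons x xs ih =>
    rw [PySem.List.enumerate_cons]
    simp only [List.foldl_cons]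
    by_cases h : s < N
    · have hm : (max 0 (N - s)).toNat = (max 0 (N - (s + 1))).toNat + 1 := by omega
      rw [if_pos h, ih (s + 1), hm]
      simp [List.append_assoc]
    · have hm0 : (max 0 (N - s)).toNat = 0 := by omega
      have hm1 : (max 0 (N - (s + 1))).toNat = 0 := by omega
      rw [if_neg h, ih (s + 1), hm0, hm1]
      simp [List.append_assoc]

-- B's correction pass rewrites every element at index ≥ k to its value minus 2*num.
theorem uredi3_fix (num : Int) :
    ∀ (m : Nat) (o : List Int) (k : Nat), o.length ≤ k + m →
    (PySem.List.pyRange (k : Int) (o.length : Int) 1).foldl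
      (fun o i => o.set i.toNat (o.getD i.toNat 0 - 2 * num)) o
    = o.take k ++ (o.drop k).map (· - 2 * num) := by
  intro m
  induction m with
  | zero =>
    intro o k hk
    have : ((o.length : Int) - k).toNat = 0 := by omega
    have hd : (o.map (fun x => x - 2 * num)).length ≤ k := by simpa using hk
    simp only [PySem.List.pyRange_one, this, List.range_zero, List.map_nil, List.foldl_nil]
    rw [List.take_of_length_le (by omega : o.length ≤ k),
        List.drop_of_length_le (by omega : o.length ≤ k)]
    simp
  | succ m ih =>
    intro o k hk
    by_cases h : k < o.length
    · have hlt : (k : Int) < (o.length : Int) := by exact_mod_cast h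
      rw [PySem.List.pyRange_one_cons hlt]
      simp only [List.foldl_cons, Int.toNat_natCast]
      have hget : o.getD k 0 = o[k] := List.getD_eq_getElem o 0 h
      have hset : o.set k (o[k] - 2 * num) = o.take k ++ (o[k] - 2 * num) :: o.drop (k + 1) := by
        rw [List.set_eq_take_append_cons_drop, if_pos h]
      have hlen : (o.set k (o.getD k 0 - 2 * num)).length = o.length := by
        simp
      have hrec := ih (o.set k (o.getD k 0 - 2 * num)) (k + 1) (by omega)
      rw [hlen] at hrec
      push_cast at hrec
      rw [hrec, hget, hset]
      have hlt' : k < (o.take k ++ (o[k] - 2 * num) :: o.drop (k + 1)).length := by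
        simp; omega
      have htk : (o.take k).length = k := by simp [Nat.min_eq_left (Nat.le_of_lt h)]
      rw [List.take_append, List.drop_append, htk,
          List.take_of_length_le (by omega : (o.take k).length ≤ k + 1),
          List.drop_of_length_le (by omega : (o.take k).length ≤ k + 1)]
      simp only [Nat.add_sub_cancel_left, List.take_succ_cons, List.take_zero,
        List.drop_succ_cons, List.drop_zero]
      rw [← List.getElem_cons_drop h]
      simp [List.append_assoc]
      have hm : k < (o.map (fun x => x - 2 * num)).length := by simpa using h
      rw [← List.getElem_cons_drop hm, List.getElem_map]
    · have : ((o.length : Int) - k).toNat = 0 := by omega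
      simp [PySem.List.pyRange_one, this,
        List.take_of_length_le (by omega : o.length ≤ k),
        List.drop_of_length_le (by omega : o.length ≤ k)]

-- ===== VERDICT (by name: the statement is the Claim_ definition above) =====
theorem uredi3_spec : Claim_equal_uredi3 := by
  intro l N num _
  unfold Spec_uredi3 uredi3 uredi3_alt
  simp only []
  have hk : (max 0 N) = (((max 0 N).toNat : Nat) : Int) := by omega
  rw [uredi3_loop l N num 0 []]
  rw [hk, uredi3_fix num (l.map (· + num)).length (l.map (· + num)) (max 0 N).toNat (by omega)]
  have h1 : (l.map (· + num)).take (max 0 N).toNat = (l.take (max 0 N).toNat).map (· + num) := by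
    simp [List.map_take]
  have h2 : (l.map (· + num)).drop (max 0 N).toNat = (l.drop (max 0 N).toNat).map (· + num) := by
    simp [List.map_drop]
  rw [h1, h2, List.map_map]
  have h3 : ((fun x => x - 2 * num) ∘ (· + num)) = (· - num) := by
    funext x; simp; ring
  rw [h3]
  simp [max_comm]
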